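-- pv_equiv track=rewrite | github.com/DONG-8/Algorithm-study | 괴수 스터디/kakao/롤케이크 자르기.py | solution
-- ===== SOURCE A (Python) =====
-- def solution(topping):
--     answer = 0
--     left_arr = [0]*10001
--     right_arr =[0]*10001
--     # 한번 기록 ->
--     for tp in topping:
--         right_arr[tp] += 1
--
--     left_count = 0
--     right_count = len(right_arr) - right_arr.count(0)
--
--     for i in range(len(topping)):
--         # 토핑 번호를 가져옴
--         tp = topping[i]
--         # 어짜피 없는걸 빼지는 않음 갯수만 체크
--         left_arr[tp] += 1
--         right_arr[tp] -= 1
--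
--         if left_arr[tp] == 1:
--             left_count += 1
--
--         if right_arr[tp] == 0:
--             right_count -= 1
--
--         # 검증
--         if left_count == right_count:
--             answer += 1
--
--     return answer
-- ===== SOURCE B (Python) =====
-- def solution(topping):
--     # Two-pass rewrite: backward pass precomputes suffix distinct counts,
--     # forward pass compares prefix distinct count against the table.
--     suffix = [0]
--     seen = set()
--     for t in reversed(topping):
--         seen.add(t)
--         suffix.append(len(seen))
--     suffix.reverse()
--     answer = 0
--     prefix = set()
--     for t, s in zip(topping, suffix[1:]):
--         prefix.add(t)
--         if len(prefix) == s:
--             answer += 1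
--     return answer
-- ===== Notes on version B (the rewrite author's own statement) =====
-- stated objective: alternative
-- what changed: Replaces A's single simultaneous incremental pass over two 10001-entry counting arrays by two set-based passes: a backward pass precomputing a suffix-distinct-count table, then a forward pass comparing the running prefix-distinct count against that table.
-- outside the precondition, e.g. on solution([-1, 10000, 5]): A returns 1, B returns 0
import Mathlib
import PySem

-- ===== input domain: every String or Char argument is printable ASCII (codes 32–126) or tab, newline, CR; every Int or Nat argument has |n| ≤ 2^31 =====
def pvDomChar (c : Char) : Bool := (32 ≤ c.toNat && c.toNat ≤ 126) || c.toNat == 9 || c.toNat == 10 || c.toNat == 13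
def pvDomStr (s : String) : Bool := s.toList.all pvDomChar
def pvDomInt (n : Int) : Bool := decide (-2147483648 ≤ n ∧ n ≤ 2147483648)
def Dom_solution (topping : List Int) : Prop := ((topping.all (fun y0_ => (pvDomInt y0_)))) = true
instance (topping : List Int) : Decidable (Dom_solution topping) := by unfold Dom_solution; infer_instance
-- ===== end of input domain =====

-- B replaces A's single simultaneous pass over two 10001-entry counting arrays by two
-- set-based passes (backward suffix-distinct table, then a forward prefix compare);
-- objective: alternative decomposition (no speed claim).

-- ===== PORT A =====
-- arr[tp] += d  (Python list index assignment, negative indices wrap; on IndexError —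
-- excluded by Pre_solution — this total form returns arr unchanged; exact wherever Python returns)
def pyAddAt (arr : List Int) (i d : Int) : List Int :=
  match PySem.List.pyGet? arr i with
  | some v => PySem.List.pySetD arr i (v + d)
  | none => arr

-- the body of A's indexed loop, on state (answer, left_arr, right_arr, left_count, right_count)
def bodyA (st : Int × List Int × List Int × Int × Int) (tp : Int) :
    Int × List Int × List Int × Int × Int :=
  let left := pyAddAt st.2.1 tp 1
  let right := pyAddAt st.2.2.1 tp (-1)
  let lc := if PySem.List.pyGetD left tp 0 == 1 then st.2.2.2.1 + 1 else st.2.2.2.1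
  let rc := if PySem.List.pyGetD right tp 0 == 0 then st.2.2.2.2 - 1 else st.2.2.2.2
  (if lc == rc then st.1 + 1 else st.1, left, right, lc, rc)

def solution (topping : List Int) : Int :=
  let left_arr : List Int := List.replicate 10001 0
  let right_arr : List Int := topping.foldl (fun arr tp => pyAddAt arr tp 1) (List.replicate 10001 0)
  let right_count : Int := PySem.List.len right_arr - (PySem.List.count right_arr 0 : Int)
  ((PySem.List.pyRange 0 (PySem.List.len topping) 1).foldl
    (fun st i => bodyA st (PySem.List.pyGetD topping i 0))
    (0, left_arr, right_arr, 0, right_count)).1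

-- ===== PORT B =====
-- backward pass: seen.add(t); suffix.append(len(seen))
def stepB (acc : List Int × PySem.Set Int) (t : Int) : List Int × PySem.Set Int :=
  let seen := PySem.Set.add acc.2 t
  (acc.1 ++ [PySem.Set.len seen], seen)

-- forward pass body on (answer, prefix), fed pairs (t, suffix[i+1])
def bodyB (st : Int × PySem.Set Int) (ts : Int × Int) : Int × PySem.Set Int :=
  let pre := PySem.Set.add st.2 ts.1
  (if PySem.Set.len pre == ts.2 then st.1 + 1 else st.1, pre)

def solution_alt (topping : List Int) : Int :=
  let bk := topping.reverse.foldl stepB ([0], PySem.Set.empty)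
  let suffix := bk.1.reverse
  ((topping.zip (PySem.List.slice suffix (some 1) none)).foldl bodyB (0, PySem.Set.empty)).1

-- ===== PRECONDITION & SPEC =====
-- Pre_ excludes (a) inputs with a topping outside [-10001, 10000], on which A raises
-- IndexError, and (b) inputs holding both a negative topping t and its alias t + 10001, a
-- defensible corner on which A's Python negative-index wraparound conflates the two
-- distinct toppings; on every other input A returns and is matched exactly.
def Pre_solution (topping : List Int) : Prop :=
  ∀ t ∈ topping, -10001 ≤ t ∧ t ≤ 10000 ∧ (t < 0 → (t + 10001) ∉ topping)
instance (topping : List Int) : Decidable (Pre_solution topping) := by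
  unfold Pre_solution; infer_instance

def pvWitness_solution : List Int := [1, 2, 1, 3]

def Spec_solution (topping : List Int) (out : Int) : Prop := out = solution_alt topping
instance (topping : List Int) (out : Int) : Decidable (Spec_solution topping out) := by
  unfold Spec_solution; infer_instance

-- ===== CLAIM (what is proved, stated in full; the proofs are below) =====
def Claim_equal_solution : Prop :=
  ∀ (topping : List Int), Dom_solution topping → Pre_solution topping →
    Spec_solution topping (solution topping)

-- ===== LEMMAS AND PROOFS =====

-- the common specification: for remaining suffix s after prefix p, the number of cuts
-- (taken after each element of s) where the two sides' distinct-topping counts agree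
def specCount : List Int → List Int → Int
  | _, [] => 0
  | p, t :: s => (if (insert t p.toFinset).card = s.toFinset.card then 1 else 0) + specCount (p ++ [t]) s

-- A's counting array under Python index semantics: entry j counts the toppings whose
-- wrapped index (keyN) is j
def keyN (x : Int) : Nat := if 0 ≤ x then x.toNat else 10001 - (-x).toNat

lemma pyIdx_eq (i : Int) (h0 : -10001 ≤ i) (h1 : i ≤ 10000) :
    PySem.List.pyIdx? 10001 i = some (keyN i) := by
  unfold PySem.List.pyIdx? keyN
  split_ifs with ha hb hc
  · rfl
  · exfalso; omega
  · rfl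
  · exfalso; omega

lemma keyN_lt (i : Int) (h0 : -10001 ≤ i) (h1 : i ≤ 10000) : keyN i < 10001 := by
  unfold keyN; split_ifs <;> omega

def cnt (l : List Int) : List Int :=
  (List.range 10001).map (fun j => ((l.countP (fun x => keyN x == j) : Nat) : Int))


lemma length_cnt (l : List Int) : (cnt l).length = 10001 := by
  simp only [cnt, List.length_map, List.length_range]

lemma pyGetD_cnt (l : List Int) (t : Int) (h0 : -10001 ≤ t) (h1 : t ≤ 10000) :
    PySem.List.pyGetD (cnt l) t 0 = ((l.countP (fun x => keyN x == keyN t) : Nat) : Int) := by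
  have hk := keyN_lt t h0 h1
  rw [PySem.List.pyGetD, PySem.List.pyGet?, length_cnt, pyIdx_eq t h0 h1]
  rw [Option.bind_some]
  rw [List.getElem?_eq_getElem (by rw [length_cnt]; exact hk)]
  simp only [cnt, List.getElem_map, List.getElem_range, Option.getD_some]

lemma pyAddAt_cnt (l : List Int) (t d : Int) (h0 : -10001 ≤ t) (h1 : t ≤ 10000) :
    pyAddAt (cnt l) t d =
      (List.range 10001).map
        (fun j => ((l.countP (fun x => keyN x == j) : Nat) : Int) + if j = keyN t then d else 0) := by
  have hk := keyN_lt t h0 h1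
  have hget : (cnt l)[keyN t]? = some ((l.countP (fun x => keyN x == keyN t) : Nat) : Int) := by
    rw [List.getElem?_eq_getElem (by rw [length_cnt]; exact hk)]
    simp only [cnt, List.getElem_map, List.getElem_range]
  rw [pyAddAt, PySem.List.pyGet?, length_cnt, pyIdx_eq t h0 h1, Option.bind_some, hget]
  show (PySem.List.pySet? (cnt l) t _).getD (cnt l) = _
  rw [PySem.List.pySet?, length_cnt, pyIdx_eq t h0 h1, Option.map_some, Option.getD_some]
  apply List.ext_getElem
  · simp only [List.length_set, length_cnt, List.length_map, List.length_range]
  · intro n hn hn'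
    simp only [List.length_set, length_cnt] at hn
    rw [List.getElem_set]
    simp only [cnt, List.getElem_map, List.getElem_range]
    by_cases he : keyN t = n
    · subst he
      rw [if_pos rfl, if_pos rfl]
    · rw [if_neg he, if_neg (by omega)]
      ring

lemma cnt_append_singleton (l : List Int) (t : Int) (h0 : -10001 ≤ t) (h1 : t ≤ 10000) :
    pyAddAt (cnt l) t 1 = cnt (l ++ [t]) := by
  rw [pyAddAt_cnt l t 1 h0 h1]
  unfold cnt
  apply List.map_congr_left
  intro j _
  rw [List.countP_append]
  by_cases he : j = keyN t
  · subst he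
    simp
  · simp only [List.countP_cons, List.countP_nil]
    have : (keyN t == j) = false := by simp [Ne.symm he]
    simp [this, he]

lemma cnt_cons_sub (l : List Int) (t : Int) (h0 : -10001 ≤ t) (h1 : t ≤ 10000) :
    pyAddAt (cnt (t :: l)) t (-1) = cnt l := by
  rw [pyAddAt_cnt _ t (-1) h0 h1]
  unfold cnt
  apply List.map_congr_left
  intro j _
  rw [List.countP_cons]
  by_cases he : j = keyN t
  · subst he
    simp
  · have : (keyN t == j) = false := by simp [Ne.symm he]
    simp [this, he]

-- membership reads off the keyed count, under key-injectivity on a covering list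
lemma countP_key_eq_zero (p : List Int) (t : Int) (L : List Int)
    (hmem : ∀ x ∈ p, x ∈ L) (htL : t ∈ L)
    (hinj : ∀ x ∈ L, ∀ y ∈ L, keyN x = keyN y → x = y) :
    (p.countP (fun x => keyN x == keyN t) = 0) ↔ t ∉ p := by
  rw [List.countP_eq_zero]
  constructor
  · intro h ht
    exact (h t ht (by simp)).elim
  · intro ht x hx
    simp only [beq_iff_eq]
    intro hk
    exact ht (hinj x (hmem x hx) t htL hk ▸ hx)

lemma map_key_card (l : List Int) (L : List Int)
    (hmem : ∀ x ∈ l, x ∈ L)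
    (hinj : ∀ x ∈ L, ∀ y ∈ L, keyN x = keyN y → x = y) :
    (l.map keyN).toFinset.card = l.toFinset.card := by
  induction l with
  | nil => simp
  | cons a l ih =>
    have hmem' : ∀ x ∈ l, x ∈ L := fun x hx => hmem x (List.mem_cons_of_mem _ hx)
    have haL : a ∈ L := hmem a (List.mem_cons_self ..)
    rw [List.map_cons, List.toFinset_cons, List.toFinset_cons]
    by_cases hm : a ∈ l
    · rw [Finset.insert_eq_self.2 (List.mem_toFinset.2 hm),
        Finset.insert_eq_self.2 (List.mem_toFinset.2 (List.mem_map_of_mem hm)), ih hmem']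
    · have hk : keyN a ∉ (l.map keyN).toFinset := by
        rw [List.mem_toFinset, List.mem_map]
        rintro ⟨x, hx, hkx⟩
        exact hm (hinj x (hmem' x hx) a haL hkx ▸ hx)
      rw [Finset.card_insert_of_notMem hk,
        Finset.card_insert_of_notMem (by simp [hm]), ih hmem']

lemma countP_filter_range (n : Nat) (q : Nat → Prop) [DecidablePred q] :
    ((Finset.range n).filter q).card = (List.range n).countP (fun j => decide (q j)) := by
  induction n with
  | zero => simp
  | succ m ih => rw [Finset.range_add_one, List.range_succ, Finset.filter_insert, List.countP_append]
                 by_cases h : q m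
                 · rw [if_pos h, Finset.card_insert_of_notMem (by simp)]
                   simp [h, ih]
                 · rw [if_neg h]
                   simp [h, ih]

lemma countP_not_add (l : List Nat) (p : Nat → Bool) : l.countP p + l.countP (fun x => !p x) = l.length := by
  induction l with
  | nil => simp
  | cons a t ih => by_cases h : p a <;> simp [h] <;> omega

lemma natlist_card_filter (kl : List Nat) (hb : ∀ j ∈ kl, j < 10001) :
    kl.toFinset.card = ((Finset.range 10001).filter (fun j => j ∈ kl)).card := by
  have hset : kl.toFinset = (Finset.range 10001).filter (fun j => j ∈ kl) := by
    ext j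
    simp only [List.mem_toFinset, Finset.mem_filter, Finset.mem_range]
    exact ⟨fun h => ⟨hb j h, h⟩, fun h => h.2⟩
  rw [hset]

lemma count_zero_cnt (l : List Int) (hb : ∀ x ∈ l, -10001 ≤ x ∧ x ≤ 10000)
    (hinj : ∀ x ∈ l, ∀ y ∈ l, keyN x = keyN y → x = y) :
    List.count (0 : Int) (cnt l) + l.toFinset.card = 10001 := by
  have hkb : ∀ j ∈ l.map keyN, j < 10001 := by
    intro j hj
    rw [List.mem_map] at hj
    obtain ⟨x, hx, rfl⟩ := hj
    exact keyN_lt x (hb x hx).1 (hb x hx).2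
  rw [← map_key_card l l (fun x hx => hx) hinj, natlist_card_filter _ hkb, countP_filter_range]
  unfold cnt
  rw [List.count_eq_countP, List.countP_map]
  have hcong : ∀ j ∈ List.range 10001,
      (((fun v => v == (0:Int)) ∘ fun j : Nat => ((l.countP (fun x => keyN x == j) : Nat) : Int)) j = true
        ↔ (fun j : Nat => !decide (j ∈ l.map keyN)) j = true) := by
    intro j _
    simp only [Function.comp_apply, beq_iff_eq, Nat.cast_eq_zero, List.countP_eq_zero,
      Bool.not_eq_eq_eq_not, Bool.not_true, decide_eq_false_iff_not, List.mem_map]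
    constructor
    · rintro h ⟨x, hx, rfl⟩
      exact h x hx (by simp)
    · intro h x hx
      exact fun hk => h ⟨x, hx, hk⟩
  rw [List.countP_congr hcong]
  have h2 := countP_not_add (List.range 10001) (fun j => decide (j ∈ l.map keyN))
  simp only [List.length_range] at h2
  omega

lemma A_loop (s : List Int) : ∀ (p : List Int) (ans : Int),
    (∀ x ∈ p ++ s, -10001 ≤ x ∧ x ≤ 10000) →
    (∀ x ∈ p ++ s, ∀ y ∈ p ++ s, keyN x = keyN y → x = y) →
    (s.foldl bodyA (ans, cnt p, cnt s, (p.toFinset.card : Int), (s.toFinset.card : Int))).1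
      = ans + specCount p s := by
  induction s with
  | nil => intro p ans _ _; simp [specCount]
  | cons t s' ih =>
    intro p ans hb hinj
    have htm : t ∈ p ++ t :: s' := by simp
    have hbt := hb t htm
    rw [List.foldl_cons]
    have hleft : pyAddAt (cnt p) t 1 = cnt (p ++ [t]) := cnt_append_singleton _ _ hbt.1 hbt.2
    have hright : pyAddAt (cnt (t :: s')) t (-1) = cnt s' := cnt_cons_sub _ _ hbt.1 hbt.2
    have hlcval := pyGetD_cnt (p ++ [t]) t hbt.1 hbt.2
    have hrcval := pyGetD_cnt s' t hbt.1 hbt.2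
    have hpz := countP_key_eq_zero p t (p ++ t :: s') (fun x hx => by simp [hx]) htm hinj
    have hsz := countP_key_eq_zero s' t (p ++ t :: s') (fun x hx => by simp [hx]) htm hinj
    have hcp : (p ++ [t]).countP (fun x => keyN x == keyN t) = p.countP (fun x => keyN x == keyN t) + 1 := by
      rw [List.countP_append]
      simp
    have hLC : (if ((((p ++ [t]).countP (fun x => keyN x == keyN t)) : Nat) : Int) == 1
          then (p.toFinset.card : Int) + 1 else (p.toFinset.card : Int))
        = (((p ++ [t]).toFinset.card : Nat) : Int) := by
      rw [hcp]
      simp only [List.toFinset_append, List.toFinset_cons, List.toFinset_nil, insert_empty_eq,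
        beq_iff_eq]
      rw [Finset.union_comm, ← Finset.insert_eq]
      by_cases hm : t ∈ p
      · have : p.countP (fun x => keyN x == keyN t) ≠ 0 := fun h => (hpz.1 h) hm
        rw [if_neg (by push_cast; omega)]
        rw [Finset.insert_eq_self.2 (List.mem_toFinset.2 hm)]
      · have : p.countP (fun x => keyN x == keyN t) = 0 := hpz.2 hm
        rw [if_pos (by push_cast; omega)]
        rw [Finset.card_insert_of_notMem (by simp [hm])]
        push_cast
        ring
    have hRC : (if (((s'.countP (fun x => keyN x == keyN t)) : Nat) : Int) == 0
          then (((t :: s').toFinset.card : Nat) : Int) - 1 else (((t :: s').toFinset.card : Nat) : Int))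
        = ((s'.toFinset.card : Nat) : Int) := by
      simp only [List.toFinset_cons, beq_iff_eq]
      by_cases hm : t ∈ s'
      · have : s'.countP (fun x => keyN x == keyN t) ≠ 0 := fun h => (hsz.1 h) hm
        rw [if_neg (by omega)]
        rw [Finset.insert_eq_self.2 (List.mem_toFinset.2 hm)]
      · have : s'.countP (fun x => keyN x == keyN t) = 0 := hsz.2 hm
        rw [if_pos (by omega)]
        rw [Finset.card_insert_of_notMem (by simp [hm])]
        push_cast
        ring
    simp only [bodyA, hleft, hright, hlcval, hrcval, hLC, hRC]
    have hmem' : ∀ x ∈ (p ++ [t]) ++ s', x ∈ p ++ t :: s' := by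
      intro x hx; simp at hx ⊢; tauto
    rw [ih (p ++ [t]) _ (fun x hx => hb x (hmem' x hx))
      (fun x hx y hy => hinj x (hmem' x hx) y (hmem' y hy))]
    simp only [specCount, List.toFinset_append, List.toFinset_cons, List.toFinset_nil,
      insert_empty_eq, beq_iff_eq, Nat.cast_inj]
    rw [Finset.union_comm, ← Finset.insert_eq]
    by_cases hcond : (insert t p.toFinset).card = s'.toFinset.card
    · rw [if_pos hcond, if_pos hcond]; ring
    · rw [if_neg hcond, if_neg hcond]; ring

lemma cnt_nil : cnt [] = List.replicate 10001 (0 : Int) := by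
  unfold cnt
  rw [List.eq_replicate_iff]
  refine ⟨by simp only [List.length_map, List.length_range], ?_⟩
  intro b hb
  simp only [List.mem_map, List.mem_range] at hb
  obtain ⟨j, _, rfl⟩ := hb
  simp only [List.countP_nil, Nat.cast_zero]

lemma build_cnt (l : List Int) : ∀ (p : List Int), (∀ x ∈ l, -10001 ≤ x ∧ x ≤ 10000) →
    l.foldl (fun arr tp => pyAddAt arr tp 1) (cnt p) = cnt (p ++ l) := by
  induction l with
  | nil => intro p _; simp
  | cons t l ih =>
    intro p hb
    have hbt := hb t (List.mem_cons_self ..)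
    rw [List.foldl_cons, cnt_append_singleton p t hbt.1 hbt.2,
      ih (p ++ [t]) (fun x hx => hb x (List.mem_cons_of_mem _ hx))]
    simp


lemma solution_eq_spec (topping : List Int) (hb : ∀ x ∈ topping, -10001 ≤ x ∧ x ≤ 10000)
    (hinj : ∀ x ∈ topping, ∀ y ∈ topping, keyN x = keyN y → x = y) :
    solution topping = specCount [] topping := by
  unfold solution
  rw [← cnt_nil]
  dsimp only
  rw [build_cnt topping [] hb]
  rw [List.nil_append]
  rw [PySem.List.foldl_pyRange_zero_pyGetD topping 0 bodyA _]
  have hrc : PySem.List.len (cnt topping) - (PySem.List.count (cnt topping) 0 : Int)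
      = ((topping.toFinset.card : Nat) : Int) := by
    have := count_zero_cnt topping hb hinj
    have hlen : PySem.List.len (cnt topping) = (10001 : Int) := by
      simp [PySem.List.len, length_cnt]
    have hcnt : PySem.List.count (cnt topping) 0 = List.count (0:Int) (cnt topping) := rfl
    rw [hlen, hcnt]
    omega
  rw [hrc]
  have h0 : (0 : Int) = ((([] : List Int).toFinset.card : Nat) : Int) := by simp
  rw [h0]
  rw [A_loop topping [] _ (by simpa using hb) (by simpa using hinj)]
  simp

lemma stepB_apply (acc : List Int × PySem.Set Int) (t : Int) :
    stepB acc t = (acc.1 ++ [PySem.Set.len (PySem.Set.add acc.2 t)], PySem.Set.add acc.2 t) := rfl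


lemma toFinset_add (s : PySem.Set Int) (x : Int) :
    (PySem.Set.add s x).toFinset = insert x s.toFinset := by
  unfold PySem.Set.add
  by_cases h : x ∈ s
  · rw [if_pos (by simpa [PySem.Set.contains] using h)]
    rw [Finset.insert_eq_self.2 (List.mem_toFinset.2 h)]
  · rw [if_neg (by simpa [PySem.Set.contains] using h)]
    rw [List.toFinset_append, Finset.union_comm]
    simp only [List.toFinset_cons, List.toFinset_nil, insert_empty_eq]
    rw [← Finset.insert_eq]

lemma len_add_card (s : PySem.Set Int) (x : Int) (h : s.Nodup) :
    PySem.Set.len (PySem.Set.add s x) = (((insert x s.toFinset).card : Nat) : Int) := by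
  have hn := PySem.Set.nodup_add s x h
  rw [← toFinset_add s x, List.toFinset_card_of_nodup hn]
  rfl

lemma bk_spec (l : List Int) :
    (l.reverse.foldl stepB ([0], PySem.Set.empty)).1
        = (List.range (l.length + 1)).map (fun k => (((l.drop (l.length - k)).toFinset.card : Nat) : Int))
      ∧ (l.reverse.foldl stepB ([0], PySem.Set.empty)).2.Nodup
      ∧ (l.reverse.foldl stepB ([0], PySem.Set.empty)).2.toFinset = l.toFinset := by
  induction l with
  | nil => refine ⟨by simp, by simp [PySem.Set.empty], by simp [PySem.Set.empty]⟩
  | cons t l ih =>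
    obtain ⟨h1, h2, h3⟩ := ih
    have hstep : (t :: l).reverse.foldl stepB ([0], PySem.Set.empty)
        = stepB (l.reverse.foldl stepB ([0], PySem.Set.empty)) t := by
      rw [List.reverse_cons, List.foldl_append, List.foldl_cons, List.foldl_nil]
    rw [hstep, stepB_apply]
    refine ⟨?_, PySem.Set.nodup_add _ _ h2, by rw [toFinset_add, h3, List.toFinset_cons]⟩
    dsimp only
    rw [h1, len_add_card _ _ h2, h3]
    show _ = (List.range (l.length + 1 + 1)).map _
    conv_rhs => rw [List.range_succ, List.map_append]
    congr 1
    · apply List.map_congr_left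
      intro k hk
      simp only [List.mem_range] at hk
      simp only [List.length_cons]
      have h4 : l.length + 1 - k = (l.length - k) + 1 := by omega
      rw [h4, List.drop_succ_cons]
    · simp only [List.map_cons, List.map_nil, List.length_cons, Nat.sub_self, List.drop_zero,
        List.toFinset_cons]

lemma suffix_tail (l : List Int) :
    ((List.range (l.length + 1)).map (fun k => (((l.drop (l.length - k)).toFinset.card : Nat) : Int))).reverse.tail
      = (List.range l.length).map (fun i => (((l.drop (i + 1)).toFinset.card : Nat) : Int)) := by
  rw [List.range_succ, List.map_append, List.reverse_append]
  simp only [List.map_cons, List.map_nil, List.reverse_cons, List.reverse_nil, List.nil_append,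
    List.cons_append, List.tail_cons]
  rw [← List.map_reverse, List.range_eq_range', List.reverse_range', ← List.range_eq_range', List.map_map]
  apply List.map_congr_left
  intro i hi
  simp only [List.mem_range] at hi
  simp only [Function.comp_apply]
  have harg : l.length - (0 + l.length - 1 - i) = i + 1 := by omega
  rw [harg]

lemma bodyB_apply (st : Int × PySem.Set Int) (ts : Int × Int) :
    bodyB st ts = (if PySem.Set.len (PySem.Set.add st.2 ts.1) == ts.2 then st.1 + 1 else st.1,
      PySem.Set.add st.2 ts.1) := rfl

lemma B_loop (s : List Int) : ∀ (p : List Int) (ans : Int) (seen : PySem.Set Int),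
    seen.Nodup → seen.toFinset = p.toFinset →
    ((s.zip ((List.range s.length).map (fun k => (((s.drop (k + 1)).toFinset.card : Nat) : Int)))).foldl
        bodyB (ans, seen)).1 = ans + specCount p s := by
  induction s with
  | nil => intro p ans seen _ _; simp [specCount]
  | cons t s' ih =>
    intro p ans seen hnd hfin
    rw [List.length_cons, List.range_succ_eq_map, List.map_cons, List.map_map, List.zip_cons_cons,
      List.foldl_cons, bodyB_apply]
    have hmap : (List.range s'.length).map
          ((fun k => ((((t :: s').drop (k + 1)).toFinset.card : Nat) : Int)) ∘ Nat.succ)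
        = (List.range s'.length).map (fun k => (((s'.drop (k + 1)).toFinset.card : Nat) : Int)) := by
      apply List.map_congr_left
      intro k _
      simp only [Function.comp_apply, Nat.succ_eq_add_one, List.drop_succ_cons]
    rw [hmap]
    have hlen : PySem.Set.len (PySem.Set.add seen t) = (((insert t p.toFinset).card : Nat) : Int) := by
      rw [len_add_card _ _ hnd, hfin]
    rw [hlen]
    have hfin' : (PySem.Set.add seen t).toFinset = (p ++ [t]).toFinset := by
      rw [toFinset_add, hfin]
      simp [List.toFinset_append]
    rw [ih (p ++ [t]) _ (PySem.Set.add seen t) (PySem.Set.nodup_add _ _ hnd) hfin']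
    simp only [List.drop_succ_cons, List.drop_zero, specCount, beq_iff_eq, Nat.cast_inj]
    by_cases hcond : (insert t p.toFinset).card = s'.toFinset.card
    · rw [if_pos hcond, if_pos hcond]; ring
    · rw [if_neg hcond, if_neg hcond]; ring


lemma solution_alt_eq_spec (topping : List Int) : solution_alt topping = specCount [] topping := by
  unfold solution_alt
  dsimp only
  rw [PySem.List.slice_from_one, (bk_spec topping).1, suffix_tail]
  rw [B_loop topping [] 0 PySem.Set.empty (by simp [PySem.Set.empty]) (by simp [PySem.Set.empty])]
  simp

-- ===== VERDICT (by name: the statement is the Claim_ definition above) =====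
theorem solution_spec : Claim_equal_solution := by
  intro topping _ hpre
  unfold Spec_solution
  have hb : ∀ x ∈ topping, -10001 ≤ x ∧ x ≤ 10000 :=
    fun x hx => ⟨(hpre x hx).1, (hpre x hx).2.1⟩
  have hinj : ∀ x ∈ topping, ∀ y ∈ topping, keyN x = keyN y → x = y := by
    intro x hx y hy hk
    have px := hpre x hx
    have py := hpre y hy
    unfold keyN at hk
    by_cases hx0 : 0 ≤ x <;> by_cases hy0 : 0 ≤ y
    · rw [if_pos hx0, if_pos hy0] at hk; omega
    · rw [if_pos hx0, if_neg hy0] at hk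
      exact absurd (show y + 10001 ∈ topping by rw [show y + 10001 = x by omega]; exact hx)
        (py.2.2 (by omega))
    · rw [if_neg hx0, if_pos hy0] at hk
      exact absurd (show x + 10001 ∈ topping by rw [show x + 10001 = y by omega]; exact hy)
        (px.2.2 (by omega))
    · rw [if_neg hx0, if_neg hy0] at hk; omega
  rw [solution_eq_spec topping hb hinj, solution_alt_eq_spec]
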